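-- pv_equiv track=rewrite | github.com/thor-sen/lead-enrichment-pipeline | enrichment_pipeline.py | deduplicate_companies
-- ===== SOURCE A (Python) =====
-- def deduplicate_companies(enriched_results):
--     best_record_per_domain = {}
--     for record in enriched_results:
--         domain = record.get('domain')
--         if not domain:
--             continue
--         if domain not in best_record_per_domain:
--             best_record_per_domain[domain] = record
--         else:
--             new_score = len([v for v in record.values() if v is not None])
--             existing_score = len([v for v in best_record_per_domain[domain].values() if v is not None])
--             if new_score > existing_score:
--                 best_record_per_domain[domain] = record
--
--     return list(best_record_per_domain.values())
-- ===== SOURCE B (Python) =====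
-- def deduplicate_companies(enriched_results):
--     groups = {}
--     for record in enriched_results:
--         domain = record.get('domain')
--         if not domain:
--             continue
--         groups.setdefault(domain, []).append(record)
--     return [max(recs, key=lambda r: len([v for v in r.values() if v is not None]))
--             for recs in groups.values()]
-- ===== Notes on version B (the rewrite author's own statement) =====
-- stated objective: alternative
-- what changed: Replaces A's streaming keep-the-best-so-far dict with a two-pass group-by-domain table followed by a first-maximal max() reduction per group.
import Mathlib
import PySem

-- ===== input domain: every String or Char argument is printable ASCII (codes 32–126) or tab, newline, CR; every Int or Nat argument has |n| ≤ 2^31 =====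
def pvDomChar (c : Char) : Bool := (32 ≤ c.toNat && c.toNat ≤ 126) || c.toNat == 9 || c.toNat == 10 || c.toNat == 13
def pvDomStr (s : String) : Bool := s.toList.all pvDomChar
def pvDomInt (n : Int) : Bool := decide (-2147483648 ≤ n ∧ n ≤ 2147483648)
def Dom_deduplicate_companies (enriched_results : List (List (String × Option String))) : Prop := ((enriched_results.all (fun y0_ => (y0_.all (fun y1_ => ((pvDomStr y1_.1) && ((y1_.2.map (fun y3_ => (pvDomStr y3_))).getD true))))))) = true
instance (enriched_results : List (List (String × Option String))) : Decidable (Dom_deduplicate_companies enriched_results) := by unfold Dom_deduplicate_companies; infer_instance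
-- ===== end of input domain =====

-- B replaces A's one-pass best-so-far tracking by a group-by-domain table plus a
-- first-maximal max() per group (alternative decomposition, same cost).

-- ===== PORT A =====
-- a record, i.e. one Python dict[str, Optional[str]], as its association list
abbrev PvRec : Type := List (String × Option String)

-- loop body of A: update the best-record-per-domain dict with one record
def pvA_step (best : PySem.Dict String PvRec) (record : PvRec) : PySem.Dict String PvRec :=
  let rec' : PvRec := (PySem.Dict.ofList record).items   -- the record as the Python dict it denotes
  match (PySem.Dict.mk rec').get? "domain" with          -- record.get('domain')
  | some (some domain) =>
    if domain = "" then best                             -- `if not domain: continue`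
    else if ¬ (best.contains domain) then best.insert domain rec'
    else
      let new_score := ((rec'.map (fun p => p.2)).filter (fun v => v.isSome)).length
      let existing_score := (((best.getD domain []).map (fun p => p.2)).filter (fun v => v.isSome)).length
      if existing_score < new_score then best.insert domain rec' else best
  | _ => best                                            -- missing key or value None: falsy, skip

def deduplicate_companies (enriched_results : List (List (String × Option String))) : List (List (String × Option String)) :=
  (enriched_results.foldl pvA_step PySem.Dict.empty).values

-- ===== PORT B =====
-- loop body of B: append the record to its domain's group (setdefault + append)
def pvB_step (groups : PySem.Dict String (List PvRec)) (record : PvRec) : PySem.Dict String (List PvRec) :=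
  let rec' : PvRec := (PySem.Dict.ofList record).items
  match (PySem.Dict.mk rec').get? "domain" with
  | some (some domain) =>
    if domain = "" then groups
    else groups.modify domain [] (fun l => l ++ [rec'])
  | _ => groups

def deduplicate_companies_alt (enriched_results : List (List (String × Option String))) : List (List (String × Option String)) :=
  let groups := enriched_results.foldl pvB_step PySem.Dict.empty
  groups.values.map (fun recs =>
    PySem.List.maxD recs (fun r => ((r.map (fun p => p.2)).filter (fun v => v.isSome)).length) [])

-- ===== PRECONDITION & SPEC =====
def Spec_deduplicate_companies (enriched_results : List (List (String × Option String))) (out : List (List (String × Option String))) : Prop := out = deduplicate_companies_alt enriched_results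
instance (enriched_results : List (List (String × Option String))) (out : List (List (String × Option String))) : Decidable (Spec_deduplicate_companies enriched_results out) := by unfold Spec_deduplicate_companies; infer_instance

-- ===== CLAIM (what is proved, stated in full; the proofs are below) =====
def Claim_equal_deduplicate_companies : Prop := ∀ (enriched_results : List (List (String × Option String))), Dom_deduplicate_companies enriched_results → Spec_deduplicate_companies enriched_results (deduplicate_companies enriched_results)

-- ===== LEMMAS AND PROOFS =====

-- score of a record (the expression both Pythons write inline)
def pvSc (r : PvRec) : Nat := ((r.map (fun p => p.2)).filter (fun v => v.isSome)).length

-- first maximal record of a group, as B computes it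
def pvBest (recs : List PvRec) : PvRec := PySem.List.maxD recs (fun r => pvSc r) []

theorem pvMax?_append {α κ : Type} [LT κ] [DecidableLT κ] (key : α → κ) (xs : List α) (x : α) :
    PySem.List.max? (xs ++ [x]) key =
      match PySem.List.max? xs key with
      | none => some x
      | some m => if key m < key x then some x else some m := by
  unfold PySem.List.max?
  rw [List.foldl_append]
  rfl

theorem pvMax?_some {α κ : Type} [LT κ] [DecidableLT κ] (key : α → κ) (xs : List α)
    (h : xs ≠ []) : ∃ m, PySem.List.max? xs key = some m := by
  induction xs using List.reverseRecOn with
  | nil => exact absurd rfl h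
  | append_singleton ys x _ =>
    rw [pvMax?_append]
    cases hys : PySem.List.max? ys key with
    | none => exact ⟨x, rfl⟩
    | some m =>
      by_cases h' : key m < key x
      · exact ⟨x, by simp [h']⟩
      · exact ⟨m, by simp [h']⟩

theorem pvBest_append (xs : List PvRec) (r : PvRec) (h : xs ≠ []) :
    pvBest (xs ++ [r]) = if pvSc (pvBest xs) < pvSc r then r else pvBest xs := by
  obtain ⟨m, hm⟩ := pvMax?_some (fun r => pvSc r) xs h
  unfold pvBest PySem.List.maxD
  rw [pvMax?_append, hm]
  by_cases h' : pvSc m < pvSc r <;> simp [h']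

theorem pvBest_single (r : PvRec) : pvBest [r] = r := rfl

-- the invariant tying A's dict to B's dict
def pvInv (a : PySem.Dict String PvRec) (g : PySem.Dict String (List PvRec)) : Prop :=
  a.items = g.items.map (fun p => (p.1, pvBest p.2)) ∧
  (∀ p ∈ g.items, p.2 ≠ []) ∧
  (g.items.map Prod.fst).Nodup

theorem pvFind?_of_nodup_keys {α : Type} {k : String} {items : List (String × α)}
    (hnd : (items.map Prod.fst).Nodup) {p : String × α} (hp : p ∈ items) (hk : p.1 = k) :
    items.find? (fun q => q.1 == k) = some p := by
  induction items with
  | nil => cases hp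
  | cons q qs ih =>
    simp only [List.map_cons, List.nodup_cons] at hnd
    by_cases hqk : q.1 = k
    · have hpq : p = q := by
        rcases List.mem_cons.mp hp with h | h
        · exact h
        · exfalso
          apply hnd.1
          have hmem : p.1 ∈ qs.map Prod.fst := List.mem_map_of_mem h
          rwa [hk, ← hqk] at hmem
      subst hpq
      simp [List.find?, hqk]
    · have hp' : p ∈ qs := by
        rcases List.mem_cons.mp hp with h | h
        · exact absurd (h ▸ hk) hqk
        · exact h
      have hfq : (q.1 == k) = false := by simp [hqk]
      rw [List.find?]
      rw [hfq]
      exact ih hnd.2 hp'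

theorem pvInv_contains (a : PySem.Dict String PvRec) (g : PySem.Dict String (List PvRec))
    (h1 : a.items = g.items.map (fun p => (p.1, pvBest p.2))) (k : String) :
    a.contains k = g.contains k := by
  simp [PySem.Dict.contains, h1, List.any_map, Function.comp_def]

theorem pvInv_step (a : PySem.Dict String PvRec) (g : PySem.Dict String (List PvRec))
    (h : pvInv a g) (record : PvRec) : pvInv (pvA_step a record) (pvB_step g record) := by
  obtain ⟨h1, h2, h3⟩ := h
  simp only [pvA_step, pvB_step]
  cases hdom : (PySem.Dict.mk ((PySem.Dict.ofList record).items)).get? "domain" with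
  | none => exact ⟨h1, h2, h3⟩
  | some od =>
    cases od with
    | none => exact ⟨h1, h2, h3⟩
    | some domain =>
      by_cases he : domain = ""
      · simp only [he, if_pos rfl]; exact ⟨h1, h2, h3⟩
      · simp only [if_neg he]
        set rec' : PvRec := (PySem.Dict.ofList record).items with hrec
        have hc := pvInv_contains a g h1 domain
        by_cases hcg : g.contains domain
        · -- domain already present
          have hca : a.contains domain = true := by rw [hc]; exact hcg
          have hfind : ∃ q ∈ g.items, q.1 = domain ∧
              g.items.find? (fun p => p.1 == domain) = some q := by
            simp only [PySem.Dict.contains, List.any_eq_true, beq_iff_eq] at hcg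
            obtain ⟨q, hq, hqk⟩ := hcg
            exact ⟨q, hq, hqk, pvFind?_of_nodup_keys h3 hq hqk⟩
          obtain ⟨q, hqmem, hqk, hq⟩ := hfind
          have hgv : g.getD domain [] = q.2 := by
            simp [PySem.Dict.getD, PySem.Dict.get?, hq]
          have hq2ne : q.2 ≠ [] := h2 q hqmem
          have hav : a.getD domain [] = pvBest q.2 := by
            simp only [PySem.Dict.getD, PySem.Dict.get?, h1]
            rw [List.find?_map]
            have : (fun p : String × PvRec => p.1 == domain) ∘
                (fun p : String × List PvRec => (p.1, pvBest p.2)) =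
                (fun p : String × List PvRec => p.1 == domain) := rfl
            rw [this, hq]
            rfl
          -- reduce both programs' branches
          simp only [hca, not_true, if_false]
          have hmod : PySem.Dict.modify g domain [] (fun l => l ++ [rec']) =
              g.insert domain (q.2 ++ [rec']) := by
            simp [PySem.Dict.modify, hgv]
          rw [hmod]
          have hinsG : (g.insert domain (q.2 ++ [rec'])).items =
              g.items.map (fun p => if p.1 == domain then (domain, q.2 ++ [rec']) else p) := by
            simp [PySem.Dict.insert, hcg]
          have hinsA : ∀ v, (a.insert domain v).items =
              a.items.map (fun p => if p.1 == domain then (domain, v) else p) := by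
            intro v; simp [PySem.Dict.insert, hca]
          have hbestapp := pvBest_append q.2 rec' hq2ne
          have hkeys : (g.items.map (fun p => if p.1 == domain then (domain, q.2 ++ [rec']) else p)).map
              Prod.fst = g.items.map Prod.fst := by
            rw [List.map_map]
            refine List.map_congr_left (fun p _ => ?_)
            by_cases hpk : p.1 = domain
            · simp [hpk]
            · simp [hpk]
          have hne : ∀ p ∈ g.items.map (fun p => if p.1 == domain then (domain, q.2 ++ [rec']) else p),
              p.2 ≠ [] := by
            intro p hp
            obtain ⟨p', hp', rfl⟩ := List.mem_map.mp hp
            by_cases hpk : p'.1 = domain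
            · simp [hpk]
            · simpa [hpk] using h2 p' hp'
          by_cases hlt : pvSc (pvBest q.2) < pvSc rec'
          · -- new record wins: A replaces, B's group max becomes rec'
            rw [hav] at *
            simp only [pvSc] at hlt
            rw [if_pos (by simpa [pvSc] using hlt)]
            refine ⟨?_, by rw [hinsG]; exact hne, by rw [hinsG, hkeys]; exact h3⟩
            rw [hinsA, hinsG, h1, List.map_map, List.map_map]
            refine List.map_congr_left (fun p hp => ?_)
            by_cases hpk : p.1 == domain
            · simp only [Function.comp_def, hpk, if_true]
              rw [hbestapp, if_pos (by simpa [pvSc] using hlt)]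
            · have hne' : ¬ p.1 = domain := by simpa using hpk
              simp [hne']
          · -- existing record stays best: A leaves the dict, B's group max is unchanged
            rw [hav] at *
            simp only [pvSc] at hlt
            rw [if_neg (by simpa [pvSc] using hlt)]
            refine ⟨?_, by rw [hinsG]; exact hne, by rw [hinsG, hkeys]; exact h3⟩
            rw [hinsG, h1, List.map_map]
            refine List.map_congr_left (fun p hp => ?_)
            by_cases hpk : p.1 == domain
            · have hp1 : p.1 = domain := beq_iff_eq.mp hpk
              have hpq : p = q := by
                have := pvFind?_of_nodup_keys h3 hp hp1
                rw [hq] at this; exact (Option.some_injective _ this).symm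
              simp only [Function.comp_def, hpk, if_true]
              rw [hbestapp, if_neg (by simpa [pvSc] using hlt), hpq]
              simp [hqk]
            · have hne' : ¬ p.1 = domain := by simpa using hpk
              simp [hne']
        · -- new domain: both append an entry
          have hca : a.contains domain = false := by rw [hc]; simpa using hcg
          have hgd : g.getD domain [] = [] := by
            simp only [PySem.Dict.contains] at hcg
            have : g.items.find? (fun p => p.1 == domain) = none := by
              rw [List.find?_eq_none]
              intro p hp
              simp only [List.any_eq_true] at hcg
              exact fun hpk => hcg ⟨p, hp, hpk⟩
            simp [PySem.Dict.getD, PySem.Dict.get?, this]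
          rw [hca, if_pos (by simp)]
          have hmod : PySem.Dict.modify g domain [] (fun l => l ++ [rec']) =
              g.insert domain [rec'] := by
            simp [PySem.Dict.modify, hgd]
          rw [hmod]
          have hkeyne : g.contains domain = false := by simpa using hcg
          refine ⟨?_, ?_, ?_⟩
          · simp [PySem.Dict.insert, hca, hkeyne, h1, pvBest_single]
          · intro p hp
            simp only [PySem.Dict.insert, hkeyne, Bool.false_eq_true, if_false,
              List.mem_append, List.mem_singleton] at hp
            rcases hp with hp | hp
            · exact h2 p hp
            · simp [hp]
          · simp only [PySem.Dict.insert, hkeyne, Bool.false_eq_true, if_false, List.map_append,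
              List.map_cons, List.map_nil]
            rw [List.nodup_append]
            refine ⟨h3, List.nodup_singleton _, ?_⟩
            intro x hx y hy
            rw [List.mem_singleton] at hy
            subst hy
            rintro rfl
            obtain ⟨p, hp, hpd⟩ := List.mem_map.mp hx
            simp only [PySem.Dict.contains, List.any_eq_true, beq_iff_eq] at hcg
            exact hcg ⟨p, hp, hpd⟩

theorem pvInv_foldl (xs : List (List (String × Option String))) :
    pvInv (xs.foldl pvA_step PySem.Dict.empty) (xs.foldl pvB_step PySem.Dict.empty) := by
  have main : ∀ (a : PySem.Dict String PvRec) (g : PySem.Dict String (List PvRec)), pvInv a g →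
      pvInv (xs.foldl pvA_step a) (xs.foldl pvB_step g) := by
    induction xs with
    | nil => exact fun a g h => h
    | cons x xs ih => exact fun a g h => ih _ _ (pvInv_step a g h x)
  exact main _ _ ⟨rfl, by simp [PySem.Dict.empty], by simp [PySem.Dict.empty]⟩

-- ===== VERDICT (by name: the statement is the Claim_ definition above) =====
theorem deduplicate_companies_spec : Claim_equal_deduplicate_companies := by
  intro xs _
  unfold Spec_deduplicate_companies deduplicate_companies deduplicate_companies_alt
  obtain ⟨h1, -, -⟩ := pvInv_foldl xs
  simp only [PySem.Dict.values, h1, List.map_map]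
  rfl
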